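-- pv_equiv track=rewrite | github.com/mat10tng/doctorEulerPython | doctorTriangle.py | triangle_under
-- ===== SOURCE A (Python) =====
-- def triangle_under(number):
-- 	lst = list()
-- 	currentNumber = 1
-- 	currentNatural = 2
-- 	while currentNumber < number:
-- 		lst.append(currentNumber)
-- 		currentNumber += currentNatural
-- 		currentNatural+= 1
-- 	return lst
-- ===== SOURCE B (Python) =====
-- def triangle_under(number):
--     if number <= 1:
--         return []
--     # exponential search for an upper bound hi with hi*(hi+1)//2 >= number
--     hi = 1
--     while hi * (hi + 1) // 2 < number:
--         hi *= 2
--     # binary search: largest lo with lo*(lo+1)//2 < number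
--     lo = 0
--     while hi - lo > 1:
--         mid = (lo + hi) // 2
--         if mid * (mid + 1) // 2 < number:
--             lo = mid
--         else:
--             hi = mid
--     return [k * (k + 1) // 2 for k in range(1, lo + 1)]
-- ===== Notes on version B (the rewrite author's own statement) =====
-- stated objective: alternative
-- what changed: Replaces A's stateful accumulator loop (running sum + counter) by computing the largest index k with k*(k+1)//2 < number via exponential + binary search and emitting each triangular number by its closed form over range(1, k+1).
import Mathlib
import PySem

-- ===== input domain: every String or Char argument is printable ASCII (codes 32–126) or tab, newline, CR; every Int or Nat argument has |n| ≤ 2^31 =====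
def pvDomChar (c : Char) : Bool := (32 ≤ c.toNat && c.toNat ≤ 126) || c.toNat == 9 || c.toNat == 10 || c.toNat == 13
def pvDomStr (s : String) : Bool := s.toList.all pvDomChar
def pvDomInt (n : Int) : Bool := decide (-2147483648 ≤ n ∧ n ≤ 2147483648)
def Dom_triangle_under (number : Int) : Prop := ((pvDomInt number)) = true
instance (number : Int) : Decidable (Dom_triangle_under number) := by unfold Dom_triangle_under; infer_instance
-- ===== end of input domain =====

-- B replaces A's running-sum loop by an exponential+binary search for the largest index k
-- with k*(k+1)//2 < number, then maps the closed form over range(1, k+1) (objective: alternative).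
-- The Nat fuel arguments of the loops are totality guards only: each proof shows the fuel
-- passed at the call site exceeds the number of iterations the Python loop performs.

-- ===== PORT A =====
-- A's while loop, state (lst, currentNumber, currentNatural); lst.append is ported
-- tail-recursively as cons onto the accumulator plus one final reverse
def triLoopA : Nat → Int → Int → Int → List Int → List Int
  | 0, _, _, _, acc => acc.reverse
  | fuel + 1, number, cur, nat, acc =>
    if cur < number then triLoopA fuel number (cur + nat) (nat + 1) (cur :: acc)
    else acc.reverse

def triangle_under (number : Int) : List Int :=
  triLoopA (number - 1).toNat number 1 2 []

-- ===== PORT B =====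
-- first while loop of B: double hi until hi*(hi+1)//2 >= number
def triGrow : Nat → Int → Int → Int
  | 0, _, hi => hi
  | fuel + 1, number, hi =>
    if PySem.Int.floordiv (hi * (hi + 1)) 2 < number then triGrow fuel number (2 * hi) else hi

-- second while loop of B: binary search, keeps tri lo < number <= tri hi
def triBS : Nat → Int → Int → Int → Int
  | 0, _, lo, _ => lo
  | fuel + 1, number, lo, hi =>
    if 1 < hi - lo then
      if PySem.Int.floordiv (PySem.Int.floordiv (lo + hi) 2 * (PySem.Int.floordiv (lo + hi) 2 + 1)) 2 < number then
        triBS fuel number (PySem.Int.floordiv (lo + hi) 2) hi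
      else
        triBS fuel number lo (PySem.Int.floordiv (lo + hi) 2)
    else lo

def triangle_under_alt (number : Int) : List Int :=
  if number ≤ 1 then []
  else
    (PySem.List.pyRange 1
        (triBS (triGrow (number - 1).toNat number 1).toNat number 0
          (triGrow (number - 1).toNat number 1) + 1) 1).map
      (fun k => PySem.Int.floordiv (k * (k + 1)) 2)

-- ===== PRECONDITION & SPEC =====
def Spec_triangle_under (number : Int) (out : List Int) : Prop := out = triangle_under_alt number
instance (number : Int) (out : List Int) : Decidable (Spec_triangle_under number out) := by unfold Spec_triangle_under; infer_instance

-- ===== CLAIM (what is proved, stated in full; the proofs are below) =====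
def Claim_equal_triangle_under : Prop := ∀ (number : Int), Dom_triangle_under number → Spec_triangle_under number (triangle_under number)

-- ===== LEMMAS AND PROOFS =====

def pvTri (k : Int) : Int := PySem.Int.floordiv (k * (k + 1)) 2

theorem pvTwoTri (k : Int) : 2 * PySem.Int.floordiv (k * (k + 1)) 2 = k * (k + 1) := by
  obtain ⟨m, hm⟩ := Int.even_mul_succ_self k
  have h : PySem.Int.floordiv (k * (k + 1)) 2 = m := by
    rw [PySem.Int.floordiv_eq_iff_of_pos (by norm_num)]
    omega
  omega

theorem pvTri_mono {a b : Int} (h0 : 0 ≤ a) (hab : a ≤ b) : pvTri a ≤ pvTri b := by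
  have ha := pvTwoTri a
  have hb := pvTwoTri b
  unfold pvTri
  nlinarith

theorem pvTri_succ (k : Int) : pvTri (k + 1) = pvTri k + (k + 1) := by
  have ha := pvTwoTri k
  have hb := pvTwoTri (k + 1)
  unfold pvTri
  nlinarith

theorem pvTri_ge_self {k : Int} (h : 1 ≤ k) : k ≤ pvTri k := by
  have := pvTwoTri k
  unfold pvTri
  nlinarith

theorem pvMidBounds {lo hi : Int} (hgt : 1 < hi - lo) :
    lo < PySem.Int.floordiv (lo + hi) 2 ∧ PySem.Int.floordiv (lo + hi) 2 < hi := by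
  have hb := (PySem.Int.floordiv_eq_iff_of_pos (a := lo + hi) (b := 2)
    (q := PySem.Int.floordiv (lo + hi) 2) (by norm_num)).mp rfl
  omega

theorem grow_spec : ∀ (fuel : Nat) (number hi : Int), 1 ≤ hi → (number - hi).toNat ≤ fuel →
    ¬ pvTri (triGrow fuel number hi) < number ∧ 1 ≤ triGrow fuel number hi := by
  intro fuel
  induction fuel with
  | zero =>
    intro number hi h1 hf
    have hge := pvTri_ge_self h1
    exact ⟨by simp [triGrow]; unfold pvTri at hge ⊢; omega, h1⟩
  | succ n ih =>
    intro number hi h1 hf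
    by_cases hc : PySem.Int.floordiv (hi * (hi + 1)) 2 < number
    · have hge := pvTri_ge_self h1
      unfold pvTri at hge
      rw [triGrow, if_pos hc]
      exact ih number (2 * hi) (by omega) (by omega)
    · rw [triGrow, if_neg hc]
      exact ⟨by unfold pvTri; omega, h1⟩

theorem bs_spec : ∀ (fuel : Nat) (number lo hi : Int), (hi - lo - 1).toNat ≤ fuel →
    0 ≤ lo → lo < hi → pvTri lo < number → ¬ pvTri hi < number →
    0 ≤ triBS fuel number lo hi ∧ pvTri (triBS fuel number lo hi) < number ∧
      ¬ pvTri (triBS fuel number lo hi + 1) < number := by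
  intro fuel
  induction fuel with
  | zero =>
    intro number lo hi hf h0 hlh hlo hhi
    have : hi = lo + 1 := by omega
    subst this
    exact ⟨h0, hlo, hhi⟩
  | succ n ih =>
    intro number lo hi hf h0 hlh hlo hhi
    by_cases hgt : 1 < hi - lo
    · have hmid := pvMidBounds hgt
      rw [triBS, if_pos hgt]
      by_cases hc : PySem.Int.floordiv (PySem.Int.floordiv (lo + hi) 2 * (PySem.Int.floordiv (lo + hi) 2 + 1)) 2 < number
      · rw [if_pos hc]
        exact ih number (PySem.Int.floordiv (lo + hi) 2) hi (by omega) (by omega) (by omega)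
          (by unfold pvTri; exact hc) hhi
      · rw [if_neg hc]
        exact ih number lo (PySem.Int.floordiv (lo + hi) 2) (by omega) h0 (by omega) hlo
          (by unfold pvTri; exact hc)
    · rw [triBS, if_neg hgt]
      have : hi = lo + 1 := by omega
      subst this
      exact ⟨h0, hlo, hhi⟩

-- A's loop, started at state (tri (k+1), k+2) with enough fuel, produces the
-- triangulars with indices k+1 .. K, where K is the largest index below number
theorem loopA_eq : ∀ (fuel : Nat) (number K k cur nat : Int) (acc : List Int),
    cur = pvTri (k + 1) → nat = k + 2 → 0 ≤ k → 0 ≤ K → (K - k).toNat ≤ fuel →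
    pvTri K < number → ¬ pvTri (K + 1) < number →
    triLoopA fuel number cur nat acc =
      acc.reverse ++ (PySem.List.pyRange (k + 1) (K + 1) 1).map (fun j => pvTri j) := by
  intro fuel
  induction fuel with
  | zero =>
    intro number K k cur nat acc hcur hnat hk hK hle hKlt hKge
    rw [PySem.List.pyRange_one_eq_nil (by omega), List.map_nil, List.append_nil]
    rfl
  | succ n ih =>
    intro number K k cur nat acc hcur hnat hk hK hle hKlt hKge
    subst hcur
    by_cases hc : pvTri (k + 1) < number
    · have hkK : k < K := by
        by_contra hkK
        have hmono : pvTri (K + 1) ≤ pvTri (k + 1) := pvTri_mono (by omega) (by omega)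
        omega
      have hstep : pvTri (k + 1) + nat = pvTri ((k + 1) + 1) := by
        rw [pvTri_succ (k + 1)]; omega
      rw [triLoopA, if_pos hc,
        ih number K (k + 1) (pvTri (k + 1) + nat) (nat + 1) (pvTri (k + 1) :: acc)
          hstep (by omega) (by omega) hK (by omega) hKlt hKge,
        PySem.List.pyRange_one_cons (a := k + 1) (b := K + 1) (by omega), List.map_cons,
        List.reverse_cons, List.append_assoc, List.cons_append, List.nil_append]
    · have hkK : K ≤ k := by
        by_contra hkK
        have hmono : pvTri (k + 1) ≤ pvTri K := pvTri_mono (by omega) (by omega)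
        omega
      rw [triLoopA, if_neg hc, PySem.List.pyRange_one_eq_nil (by omega), List.map_nil,
        List.append_nil]

-- ===== VERDICT (by name: the statement is the Claim_ definition above) =====
theorem triangle_under_spec : Claim_equal_triangle_under := by
  intro number _
  unfold Spec_triangle_under triangle_under triangle_under_alt
  by_cases hn : number ≤ 1
  · have h0 : (number - 1).toNat = 0 := by omega
    rw [h0, if_pos hn]
    rfl
  · rw [if_neg hn]
    obtain ⟨hg1, hg2⟩ := grow_spec (number - 1).toNat number 1 (le_refl 1) (by omega)
    obtain ⟨hr0, hrlt, hrge⟩ := bs_spec (triGrow (number - 1).toNat number 1).toNat number 0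
      (triGrow (number - 1).toNat number 1) (by omega) (le_refl 0) (by omega)
      (by show pvTri 0 < number; unfold pvTri; simp [PySem.Int.floordiv]; omega) hg1
    have hfuel : ((triBS (triGrow (number - 1).toNat number 1).toNat number 0
        (triGrow (number - 1).toNat number 1)) - 0).toNat ≤ (number - 1).toNat := by
      rcases lt_or_ge (triBS (triGrow (number - 1).toNat number 1).toNat number 0
          (triGrow (number - 1).toNat number 1)) 1 with h | h
      · omega
      · have := pvTri_ge_self h
        omega
    have hA := loopA_eq (number - 1).toNat number
      (triBS (triGrow (number - 1).toNat number 1).toNat number 0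
        (triGrow (number - 1).toNat number 1)) 0 1 2 []
      (by unfold pvTri; norm_num) (by norm_num) (by norm_num) hr0 hfuel hrlt hrge
    rw [hA, List.reverse_nil, List.nil_append]
    norm_num [pvTri]
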